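-- pv_equiv track=rewrite | github.com/bog5d/ai-pitch-coach | src/llm_judge.py | _closing_brace_indices_outside_strings
-- ===== SOURCE A (Python) =====
-- def _closing_brace_indices_outside_strings(s: str) -> list[int]:
--     """从左到右记录所有位于 JSON 字符串外的 `}` 下标（供逆向裁剪候选）。"""
--     in_str = False
--     escape = False
--     out: list[int] = []
--     for i, c in enumerate(s):
--         if escape:
--             escape = False
--             continue
--         if in_str:
--             if c == "\\":
--                 escape = True
--             elif c == '"':
--                 in_str = False
--             continue
--         if c == '"':
--             in_str = True
--         elif c == "}":
--             out.append(i)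
--     return out
-- ===== SOURCE B (Python) =====
-- def _closing_brace_indices_outside_strings(s: str) -> list[int]:
--     """Index-based scan: string bodies are consumed by a nested skipping loop."""
--     out: list[int] = []
--     n = len(s)
--     i = 0
--     while i < n:
--         c = s[i]
--         if c == "}":
--             out.append(i)
--         elif c == '"':
--             j = i + 1
--             while j < n:
--                 if s[j] == "\\":
--                     j += 2
--                 elif s[j] == '"':
--                     break
--                 else:
--                     j += 1
--             i = j
--         i += 1
--     return out
-- ===== Notes on version B (the rewrite author's own statement) =====
-- stated objective: alternative
-- what changed: Replaced the in_str/escape boolean state machine over enumerate with an explicit index-based outer loop that, on a quote, consumes the whole string body in a nested skipping loop and jumps the cursor past it.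
import Mathlib
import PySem

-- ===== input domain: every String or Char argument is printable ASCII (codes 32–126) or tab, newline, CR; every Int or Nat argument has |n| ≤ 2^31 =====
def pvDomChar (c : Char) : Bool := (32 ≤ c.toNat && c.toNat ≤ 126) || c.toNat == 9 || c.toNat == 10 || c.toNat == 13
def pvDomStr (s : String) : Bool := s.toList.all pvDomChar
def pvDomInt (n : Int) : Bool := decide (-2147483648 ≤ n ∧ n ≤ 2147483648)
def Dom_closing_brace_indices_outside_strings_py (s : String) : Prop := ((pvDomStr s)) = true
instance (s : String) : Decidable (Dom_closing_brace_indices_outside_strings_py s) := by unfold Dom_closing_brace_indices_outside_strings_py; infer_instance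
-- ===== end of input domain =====

-- B replaces A's in_str/escape flag state machine by an index-based loop with a
-- nested string-skipping scan (alternative decomposition, same O(n) cost).

-- ===== PORT A =====
-- state = (in_str, escape, out); one step of A's for-loop body
def pvStepA (st : Bool × Bool × List Int) (p : Int × Char) : Bool × Bool × List Int :=
  if st.2.1 then (st.1, false, st.2.2)
  else if st.1 then
    if p.2 = '\\' then (st.1, true, st.2.2)
    else if p.2 = '"' then (false, st.2.1, st.2.2)
    else st
  else if p.2 = '"' then (true, st.2.1, st.2.2)
  else if p.2 = '}' then (st.1, st.2.1, st.2.2 ++ [p.1])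
  else st

def closing_brace_indices_outside_strings_py (s : String) : List Int :=
  ((PySem.List.enumerate s.toList 0).foldl pvStepA (false, false, [])).2.2

-- ===== PORT B =====
-- inner 'while j < n' loop: returns the cursor where it stops (break or j ≥ n).
-- 'fuel' only makes the recursion structural; the cursor strictly increases while
-- it is < cs.length, so cs.length steps always suffice (pvSkipStrF_congr below).
def pvSkipStrF : Nat → List Char → Nat → Nat
  | 0, _, j => j
  | fuel + 1, cs, j =>
    if h : j < cs.length then
      if cs[j] = '\\' then pvSkipStrF fuel cs (j + 2)
      else if cs[j] = '"' then j
      else pvSkipStrF fuel cs (j + 1)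
    else j

def pvSkipStr (cs : List Char) (j : Nat) : Nat := pvSkipStrF cs.length cs j

-- outer 'while i < n' loop (same fuel device)
def pvAltLoopF : Nat → List Char → Nat → List Int
  | 0, _, _ => []
  | fuel + 1, cs, i =>
    if h : i < cs.length then
      if cs[i] = '}' then (i : Int) :: pvAltLoopF fuel cs (i + 1)
      else if cs[i] = '"' then pvAltLoopF fuel cs (pvSkipStr cs (i + 1) + 1)
      else pvAltLoopF fuel cs (i + 1)
    else []

def pvAltLoop (cs : List Char) (i : Nat) : List Int := pvAltLoopF cs.length cs i

def closing_brace_indices_outside_strings_py_alt (s : String) : List Int :=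
  pvAltLoop s.toList 0

-- ===== PRECONDITION & SPEC =====
def Spec_closing_brace_indices_outside_strings_py (s : String) (out : List Int) : Prop := out = closing_brace_indices_outside_strings_py_alt s
instance (s : String) (out : List Int) : Decidable (Spec_closing_brace_indices_outside_strings_py s out) := by unfold Spec_closing_brace_indices_outside_strings_py; infer_instance

-- ===== CLAIM (what is proved, stated in full; the proofs are below) =====
def Claim_equal_closing_brace_indices_outside_strings_py : Prop := ∀ (s : String), Dom_closing_brace_indices_outside_strings_py s → Spec_closing_brace_indices_outside_strings_py s (closing_brace_indices_outside_strings_py s)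

-- ===== LEMMAS AND PROOFS =====

theorem le_pvSkipStrF (fuel : Nat) (cs : List Char) (j : Nat) : j ≤ pvSkipStrF fuel cs j := by
  induction fuel generalizing j with
  | zero => simp [pvSkipStrF]
  | succ f ih =>
    simp only [pvSkipStrF]
    split
    · split
      · exact le_trans (by omega) (ih (j + 2))
      · split
        · exact le_refl _
        · exact le_trans (by omega) (ih (j + 1))
    · exact le_refl _

theorem le_pvSkipStr (cs : List Char) (j : Nat) : j ≤ pvSkipStr cs j :=
  le_pvSkipStrF cs.length cs j

theorem pvSkipStrF_congr (cs : List Char) :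
    ∀ (f1 f2 j : Nat), cs.length - j ≤ f1 → cs.length - j ≤ f2 →
      pvSkipStrF f1 cs j = pvSkipStrF f2 cs j := by
  intro f1
  induction f1 with
  | zero =>
    intro f2 j h1 _
    have hj : ¬ j < cs.length := by omega
    cases f2 <;> simp [pvSkipStrF, hj]
  | succ f ih =>
    intro f2 j h1 h2
    by_cases hj : j < cs.length
    · obtain ⟨f2', rfl⟩ : ∃ m, f2 = m + 1 := ⟨f2 - 1, by omega⟩
      simp only [pvSkipStrF, dif_pos hj]
      split
      · exact ih f2' (j + 2) (by omega) (by omega)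
      · split
        · rfl
        · exact ih f2' (j + 1) (by omega) (by omega)
    · cases f2 <;> simp [pvSkipStrF, hj]

theorem pvSkipStr_eq (cs : List Char) (j : Nat) :
    pvSkipStr cs j =
      if h : j < cs.length then
        if cs[j] = '\\' then pvSkipStr cs (j + 2)
        else if cs[j] = '"' then j
        else pvSkipStr cs (j + 1)
      else j := by
  by_cases hj : j < cs.length
  · rw [dif_pos hj]
    unfold pvSkipStr
    conv_lhs => rw [show cs.length = (cs.length - 1) + 1 from by omega]
    simp only [pvSkipStrF, dif_pos hj]
    split
    · exact pvSkipStrF_congr cs (cs.length - 1) cs.length (j + 2) (by omega) (by omega)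
    · split
      · rfl
      · exact pvSkipStrF_congr cs (cs.length - 1) cs.length (j + 1) (by omega) (by omega)
  · rw [dif_neg hj]
    unfold pvSkipStr
    cases hE : cs.length with
    | zero => simp [pvSkipStrF]
    | succ m => simp only [pvSkipStrF]; exact dif_neg hj

theorem pvAltLoopF_congr (cs : List Char) :
    ∀ (f1 f2 i : Nat), cs.length - i ≤ f1 → cs.length - i ≤ f2 →
      pvAltLoopF f1 cs i = pvAltLoopF f2 cs i := by
  intro f1
  induction f1 with
  | zero =>
    intro f2 i h1 _
    have hi : ¬ i < cs.length := by omega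
    cases f2 <;> simp [pvAltLoopF, hi]
  | succ f ih =>
    intro f2 i h1 h2
    by_cases hi : i < cs.length
    · obtain ⟨f2', rfl⟩ : ∃ m, f2 = m + 1 := ⟨f2 - 1, by omega⟩
      simp only [pvAltLoopF, dif_pos hi]
      split
      · rw [ih f2' (i + 1) (by omega) (by omega)]
      · split
        · have hs := le_pvSkipStr cs (i + 1)
          exact ih f2' (pvSkipStr cs (i + 1) + 1) (by omega) (by omega)
        · exact ih f2' (i + 1) (by omega) (by omega)
    · cases f2 <;> simp [pvAltLoopF, hi]

theorem pvAltLoop_eq (cs : List Char) (i : Nat) :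
    pvAltLoop cs i =
      if h : i < cs.length then
        if cs[i] = '}' then (i : Int) :: pvAltLoop cs (i + 1)
        else if cs[i] = '"' then pvAltLoop cs (pvSkipStr cs (i + 1) + 1)
        else pvAltLoop cs (i + 1)
      else [] := by
  by_cases hi : i < cs.length
  · rw [dif_pos hi]
    unfold pvAltLoop
    conv_lhs => rw [show cs.length = (cs.length - 1) + 1 from by omega]
    simp only [pvAltLoopF, dif_pos hi]
    split
    · rw [pvAltLoopF_congr cs (cs.length - 1) cs.length (i + 1) (by omega) (by omega)]
    · split
      · have hs := le_pvSkipStr cs (i + 1)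
        exact pvAltLoopF_congr cs (cs.length - 1) cs.length (pvSkipStr cs (i + 1) + 1)
          (by omega) (by omega)
      · exact pvAltLoopF_congr cs (cs.length - 1) cs.length (i + 1) (by omega) (by omega)
  · rw [dif_neg hi]
    unfold pvAltLoop
    cases hE : cs.length with
    | zero => simp [pvAltLoopF]
    | succ m => simp only [pvAltLoopF]; exact dif_neg hi

theorem pvAltLoop_stop (cs : List Char) (i : Nat) (h : cs.length ≤ i) :
    pvAltLoop cs i = [] := by
  rw [pvAltLoop_eq]; simp [Nat.not_lt.mpr h]

-- the three reachable states of A's machine, related to B's cursor positions,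
-- by one induction over the remaining suffix of the input
theorem pv_inv (cs : List Char) :
    ∀ (l : List Char) (k : Nat) (out : List Int), cs.drop k = l →
      (((PySem.List.enumerate l (k : Int)).foldl pvStepA (false, false, out)).2.2
          = out ++ pvAltLoop cs k)
      ∧ (((PySem.List.enumerate l (k : Int)).foldl pvStepA (true, false, out)).2.2
          = out ++ pvAltLoop cs (pvSkipStr cs k + 1))
      ∧ (((PySem.List.enumerate l (k : Int)).foldl pvStepA (true, true, out)).2.2
          = out ++ pvAltLoop cs (pvSkipStr cs (k + 1) + 1)) := by
  intro l
  induction l with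
  | nil =>
    intro k out hd
    have hk : cs.length ≤ k := by
      by_contra hlt
      have : cs.drop k ≠ [] := by
        apply List.ne_nil_of_length_pos
        simp [List.length_drop]; omega
      exact this hd
    have hs1 : cs.length ≤ pvSkipStr cs k + 1 :=
      le_trans (le_trans hk (le_pvSkipStr cs k)) (by omega)
    have hs2 : cs.length ≤ pvSkipStr cs (k + 1) + 1 :=
      le_trans (le_trans (by omega : cs.length ≤ k + 1) (le_pvSkipStr cs (k + 1))) (by omega)
    simp [PySem.List.enumerate_nil, pvAltLoop_stop cs k hk,
      pvAltLoop_stop cs _ hs1, pvAltLoop_stop cs _ hs2]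
  | cons c l' ih =>
    intro k out hd
    have hk : k < cs.length := by
      by_contra hge
      rw [List.drop_eq_nil_of_le (by omega)] at hd
      exact List.cons_ne_nil c l' hd.symm
    have hc0 : cs[k]? = some c := by
      have := congrArg (fun t => t[0]?) hd
      simpa [List.getElem?_drop] using this
    have hc : cs[k] = c := by
      rw [List.getElem?_eq_getElem hk] at hc0
      exact Option.some.inj hc0
    have hd' : cs.drop (k + 1) = l' := by
      have h1 : List.drop 1 (List.drop k cs) = List.drop (k + 1) cs := List.drop_drop
      rw [← h1, hd]
      rfl
    have ih' := ih (k + 1) ; clear ih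
    have keq : ((k : Int) + 1) = ((k + 1 : Nat) : Int) := by push_cast; ring
    refine ⟨?_, ?_, ?_⟩
    · -- state (false, false)
      rw [PySem.List.enumerate_cons, List.foldl_cons, keq]
      by_cases hq : c = '"'
      · have hstep : pvStepA (false, false, out) ((k : Int), c) = (true, false, out) := by
          simp [pvStepA, hq]
        rw [hstep, (ih' out hd').2.1]
        conv_rhs => rw [pvAltLoop_eq]
        simp [hk, hc, hq]
      · by_cases hb : c = '}'
        · have hstep : pvStepA (false, false, out) ((k : Int), c)
              = (false, false, out ++ [(k : Int)]) := by
            simp [pvStepA, hb]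
          rw [hstep, (ih' (out ++ [(k : Int)]) hd').1]
          conv_rhs => rw [pvAltLoop_eq]
          simp [hk, hc, hb]
        · have hstep : pvStepA (false, false, out) ((k : Int), c) = (false, false, out) := by
            simp [pvStepA, hq, hb]
          rw [hstep, (ih' out hd').1]
          conv_rhs => rw [pvAltLoop_eq]
          simp [hk, hc, hb, hq]
    · -- state (true, false)
      rw [PySem.List.enumerate_cons, List.foldl_cons, keq]
      by_cases hbs : c = '\\'
      · have hstep : pvStepA (true, false, out) ((k : Int), c) = (true, true, out) := by
          simp [pvStepA, hbs]
        rw [hstep, (ih' out hd').2.2]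
        conv_rhs => rw [pvSkipStr_eq]
        simp [hk, hc, hbs]
      · by_cases hq : c = '"'
        · have hstep : pvStepA (true, false, out) ((k : Int), c) = (false, false, out) := by
            simp [pvStepA, hq]
          rw [hstep, (ih' out hd').1]
          conv_rhs => rw [pvSkipStr_eq]
          simp [hk, hc, hq]
        · have hstep : pvStepA (true, false, out) ((k : Int), c) = (true, false, out) := by
            simp [pvStepA, hbs, hq]
          rw [hstep, (ih' out hd').2.1]
          conv_rhs => rw [pvSkipStr_eq]
          simp [hk, hc, hbs, hq]
    · -- state (true, true): the escaped character is consumed blindly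
      rw [PySem.List.enumerate_cons, List.foldl_cons, keq]
      have hstep : pvStepA (true, true, out) ((k : Int), c) = (true, false, out) := by
        simp [pvStepA]
      rw [hstep]
      exact (ih' out hd').2.1

-- ===== VERDICT (by name: the statement is the Claim_ definition above) =====
theorem closing_brace_indices_outside_strings_py_spec : Claim_equal_closing_brace_indices_outside_strings_py := by
  intro s _
  unfold Spec_closing_brace_indices_outside_strings_py
  unfold closing_brace_indices_outside_strings_py closing_brace_indices_outside_strings_py_alt
  have := (pv_inv s.toList s.toList 0 [] (by simp)).1
  simpa using this
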